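-- pv_equiv track=rewrite | github.com/minkaas/AdventOfCode_2 | 2025/Day3/Day3.py | part1
-- ===== SOURCE A (Python) =====
-- def part1(data):
--     result = 0
--     for battery in data:
--         battery = [int(d) for d in str(battery)]
--         max_digit = max(battery)
--         if battery.index(max_digit) < len(battery) - 1:
--             first_digit = max_digit
--             remaining_battery = battery[battery.index(max_digit)+1:len(battery)]
--             second_digit = max(remaining_battery)
--             result += 10* first_digit + second_digit
--         else:
--             max_digit = max(battery[0:-1])
--             first_digit = max_digit
--             remaining_battery = battery[battery.index(max_digit)+1:len(battery)]
--             second_digit = max(remaining_battery)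
--             result += 10 * first_digit + second_digit
--     return result
-- ===== SOURCE B (Python) =====
-- def part1(data):
--     result = 0
--     for battery in data:
--         digits = [int(d) for d in str(battery)]
--         prefix_max = digits[0]
--         candidates = []
--         for d in digits[1:]:
--             candidates.append(10 * prefix_max + d)
--             if d > prefix_max:
--                 prefix_max = d
--         result += max(candidates)
--     return result
-- ===== Notes on version B (the rewrite author's own statement) =====
-- stated objective: simpler
-- what changed: Replaces A's global-max/index/slice/suffix-max branch analysis with a single prefix-maximum pass per number that collects every candidate 10*prefix_max+digit and takes its maximum.
import Mathlib
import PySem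

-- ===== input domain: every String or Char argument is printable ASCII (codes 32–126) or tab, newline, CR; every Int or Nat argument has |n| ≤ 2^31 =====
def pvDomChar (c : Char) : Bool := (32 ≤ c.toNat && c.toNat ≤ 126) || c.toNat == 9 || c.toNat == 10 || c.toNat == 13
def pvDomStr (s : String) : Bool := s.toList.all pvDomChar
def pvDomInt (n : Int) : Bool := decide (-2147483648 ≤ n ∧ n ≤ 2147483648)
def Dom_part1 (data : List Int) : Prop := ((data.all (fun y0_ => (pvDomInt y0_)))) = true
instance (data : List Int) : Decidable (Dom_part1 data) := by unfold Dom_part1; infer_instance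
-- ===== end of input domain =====

-- B replaces A's global-max/index/slice re-scans by one prefix-maximum pass per number (same cost, simpler);
-- equivalence is over the return value only (neither program mutates its argument).

-- ===== PORT A =====
-- battery = [int(d) for d in str(battery)]; int on one char via ofChars? — none is Python's ValueError (on '-'), excluded by Pre_
def pyDigitInt (c : Char) : Int := (PySem.Int.ofChars? [c]).getD 0
def pyDigits (b : Int) : List Int := (PySem.Int.toChars b).map pyDigitInt

def part1Body (battery0 : Int) : Int :=
  let battery := pyDigits battery0
  -- max(battery): .getD 0 is unreachable (battery is nonempty, str(n) ≠ "")
  let max_digit := (PySem.List.max? battery (fun y => y)).getD 0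
  if (((PySem.List.index? battery max_digit).getD 0 : Nat) : Int) < PySem.List.len battery - 1 then
    let first_digit := max_digit
    let remaining := PySem.List.slice battery
      (some ((((PySem.List.index? battery max_digit).getD 0 : Nat) : Int) + 1)) (some (PySem.List.len battery))
    -- max(remaining): .getD 0 unreachable in this branch (remaining nonempty)
    let second_digit := (PySem.List.max? remaining (fun y => y)).getD 0
    10 * first_digit + second_digit
  else
    -- max(battery[0:-1]): .getD 0 = Python's ValueError on a single-digit number, excluded by Pre_
    let md := (PySem.List.max? (PySem.List.slice battery (some 0) (some (-1))) (fun y => y)).getD 0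
    let first_digit := md
    let remaining := PySem.List.slice battery
      (some ((((PySem.List.index? battery md).getD 0 : Nat) : Int) + 1)) (some (PySem.List.len battery))
    let second_digit := (PySem.List.max? remaining (fun y => y)).getD 0
    10 * first_digit + second_digit

def part1 (data : List Int) : Int :=
  data.foldl (fun result battery => result + part1Body battery) 0

-- ===== PORT B =====
def part1AltBody (battery : Int) : Int :=
  let digits := pyDigits battery
  let prefix_max := (PySem.List.pyGet? digits 0).getD 0     -- digits[0]; none = IndexError, excluded by Pre_
  let st := (PySem.List.slice digits (some 1) none).foldl    -- for d in digits[1:]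
      (fun (st : List Int × Int) d =>
        (st.1 ++ [10 * st.2 + d], if st.2 < d then d else st.2)) ([], prefix_max)
  -- max(candidates): .getD 0 = Python's ValueError on a single-digit number, excluded by Pre_
  (PySem.List.max? st.1 (fun y => y)).getD 0

def part1_alt (data : List Int) : Int :=
  data.foldl (fun result battery => result + part1AltBody battery) 0

-- ===== PRECONDITION & SPEC =====
-- Pre_ excludes exactly the inputs on which Python A raises ValueError: an element < 10 is either negative
-- (int('-') raises while listing the digits) or a single digit (max of the empty list battery[0:-1] raises).
def Pre_part1 (data : List Int) : Prop := ∀ b ∈ data, 10 ≤ b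
instance (data : List Int) : Decidable (Pre_part1 data) := by unfold Pre_part1; infer_instance
def pvWitness_part1 : List Int := [48, 2025]

def Spec_part1 (data : List Int) (out : Int) : Prop := out = part1_alt data
instance (data : List Int) (out : Int) : Decidable (Spec_part1 data out) := by unfold Spec_part1; infer_instance

-- ===== CLAIM (what is proved, stated in full; the proofs are below) =====
def Claim_equal_part1 : Prop := ∀ (data : List Int), Dom_part1 data → Pre_part1 data → Spec_part1 data (part1 data)

-- ===== LEMMAS AND PROOFS =====

-- running maximum (max(xs) as Python's loop computes it) and reference notions
def fmax (a : Int) (l : List Int) : Int := l.foldl max a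

def fmaxL : List Int → Int
  | [] => 0
  | x :: u => fmax x u

-- candidate list produced by B's inner loop
def cands (pm : Int) : List Int → List Int
  | [] => []
  | d :: t => (10 * pm + d) :: cands (if pm < d then d else pm) t

-- reference value: best 10*ds[i]+ds[j] with i<j, as a recursion on a::b::t
def pm2 (a b : Int) : List Int → Int
  | [] => 10 * a + b
  | c :: t => max (10 * a + fmax b (c :: t)) (pm2 b c t)

def pairMax : List Int → Int
  | a :: b :: t => pm2 a b t
  | _ => 0

theorem fmax_max (a b : Int) (l : List Int) : fmax (max a b) l = max a (fmax b l) := by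
  induction l generalizing a b with
  | nil => simp [fmax]
  | cons c t ih =>
      show fmax (max (max a b) c) t = max a (fmax (max b c) t)
      rw [max_assoc, ih]

theorem fmax_cons (a b : Int) (l : List Int) : fmax a (b :: l) = max a (fmax b l) := fmax_max a b l

theorem le_fmax_self (a : Int) (l : List Int) : a ≤ fmax a l := by
  induction l generalizing a with
  | nil => simp [fmax]
  | cons b t ih => calc a ≤ max a b := le_max_left _ _
                    _ ≤ fmax (max a b) t := ih _
                    _ = fmax a (b :: t) := rfl

theorem le_fmax_of_mem {x : Int} {l : List Int} (h : x ∈ l) (a : Int) : x ≤ fmax a l := by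
  induction l generalizing a with
  | nil => cases h
  | cons b t ih =>
      rcases List.mem_cons.mp h with rfl | hx
      · calc x ≤ max a x := le_max_right _ _
          _ ≤ fmax (max a x) t := le_fmax_self _ _
      · exact ih hx (max a b)

theorem fmax_mem_or (a : Int) (l : List Int) : fmax a l = a ∨ fmax a l ∈ l := by
  induction l generalizing a with
  | nil => left; rfl
  | cons b t ih =>
      show fmax (max a b) t = a ∨ fmax (max a b) t ∈ b :: t
      rcases ih (max a b) with h | h
      · rcases max_choice a b with hm | hm
        · left; rw [h, hm]
        · right; rw [h, hm]; exact List.mem_cons_self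
      · right; exact List.mem_cons_of_mem _ h

theorem fmax_le_of_ub {a C : Int} {l : List Int} (ha : a ≤ C) (hl : ∀ x ∈ l, x ≤ C) :
    fmax a l ≤ C := by
  rcases fmax_mem_or a l with h | h
  · rw [h]; exact ha
  · exact hl _ h

theorem fmax_eq_of_mem_ub {M a : Int} {l : List Int} (hmem : M ∈ a :: l)
    (hub : ∀ x ∈ a :: l, x ≤ M) : fmax a l = M := by
  refine le_antisymm (fmax_le_of_ub (hub a List.mem_cons_self) ?_) ?_
  · exact fun x hx => hub x (List.mem_cons_of_mem _ hx)
  · rcases List.mem_cons.mp hmem with rfl | h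
    · exact le_fmax_self _ _
    · exact le_fmax_of_mem h a

theorem fmax_append (a : Int) (l1 l2 : List Int) : fmax a (l1 ++ l2) = fmax (fmax a l1) l2 := by
  simp [fmax, List.foldl_append]

theorem fmax_append_singleton (a x : Int) (l : List Int) :
    fmax a (l ++ [x]) = max (fmax a l) x := by
  simp [fmax_append]
  rfl

theorem fmaxL_append_singleton_ub {M : Int} {l : List Int} (h : ∀ x ∈ l, x ≤ M) :
    fmaxL (l ++ [M]) = M := by
  cases l with
  | nil => simp [fmaxL, fmax]
  | cons q u =>
      show fmax q (u ++ [M]) = M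
      rw [fmax_append_singleton]
      have : fmax q u ≤ M :=
        fmax_le_of_ub (h q List.mem_cons_self) (fun x hx => h x (List.mem_cons_of_mem _ hx))
      omega

theorem max?_getD_eq_fmaxL (l : List Int) (h : l ≠ []) :
    (PySem.List.max? l (fun y => y)).getD 0 = fmaxL l := by
  cases l with
  | nil => exact absurd rfl h
  | cons x t => rw [PySem.List.max?_id_cons]; rfl

-- B's loop accumulates exactly `cands`
theorem foldl_cands (l : List Int) : ∀ (acc : List Int) (pm : Int),
    (l.foldl (fun (st : List Int × Int) d =>
      (st.1 ++ [10 * st.2 + d], if st.2 < d then d else st.2)) (acc, pm)).1 = acc ++ cands pm l := by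
  induction l with
  | nil => intro acc pm; simp [cands]
  | cons d t ih =>
      intro acc pm
      show (t.foldl _ (acc ++ [10 * pm + d], if pm < d then d else pm)).1 = _
      rw [ih]
      simp [cands]

theorem pm2_max_first (p q b : Int) (t : List Int) :
    pm2 (max p q) b t = max (pm2 p b t) (pm2 q b t) := by
  cases t with
  | nil => show 10 * max p q + b = max (10 * p + b) (10 * q + b); omega
  | cons c t' =>
      show max (10 * max p q + fmax b (c :: t')) (pm2 b c t')
        = max (max (10 * p + fmax b (c :: t')) (pm2 b c t'))
              (max (10 * q + fmax b (c :: t')) (pm2 b c t'))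
      generalize fmax b (c :: t') = F
      generalize pm2 b c t' = K
      omega

-- the heart of B: the prefix-maximum scan computes the best ordered pair
theorem cands_fmax_eq_pm2 (t : List Int) : ∀ (pm d : Int),
    fmax (10 * pm + d) (cands (if pm < d then d else pm) t) = pm2 pm d t := by
  induction t with
  | nil => intro pm d; simp [cands, fmax, pm2]
  | cons c t' ih =>
      intro pm d
      have hmax : (if pm < d then d else pm) = max pm d := by omega
      rw [hmax]
      show fmax (10 * pm + d) ((10 * max pm d + c) :: cands (if max pm d < c then c else max pm d) t')
        = pm2 pm d (c :: t')
      rw [fmax_cons, ih (max pm d) c, pm2_max_first]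
      show max (10 * pm + d) (max (pm2 pm c t') (pm2 d c t'))
        = max (10 * pm + fmax d (c :: t')) (pm2 d c t')
      rw [fmax_cons d c t']
      cases t' with
      | nil =>
          show max (10 * pm + d) (max (10 * pm + c) (10 * d + c))
            = max (10 * pm + max d (fmax c [])) (10 * d + c)
          show max (10 * pm + d) (max (10 * pm + c) (10 * d + c))
            = max (10 * pm + max d c) (10 * d + c)
          omega
      | cons e t'' =>
          show max (10 * pm + d)
              (max (max (10 * pm + fmax c (e :: t'')) (pm2 c e t''))
                   (max (10 * d + fmax c (e :: t'')) (pm2 c e t'')))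
            = max (10 * pm + max d (fmax c (e :: t'')))
                  (max (10 * d + fmax c (e :: t'')) (pm2 c e t''))
          generalize fmax c (e :: t'') = F
          generalize pm2 c e t'' = R
          omega

theorem pm2_le_of_ub : ∀ (t : List Int) (a b C : Int), a ≤ C → b ≤ C → (∀ x ∈ t, x ≤ C) →
    pm2 a b t ≤ 11 * C := by
  intro t
  induction t with
  | nil => intro a b C ha hb _; show 10 * a + b ≤ 11 * C; omega
  | cons c t' ih =>
      intro a b C ha hb ht
      have hc : c ≤ C := ht c List.mem_cons_self
      have ht' : ∀ x ∈ t', x ≤ C := fun x hx => ht x (List.mem_cons_of_mem _ hx)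
      have h1 : fmax b (c :: t') ≤ C := fmax_le_of_ub hb ht
      have h2 : pm2 b c t' ≤ 11 * C := ih b c C hb hc ht'
      show max (10 * a + fmax b (c :: t')) (pm2 b c t') ≤ 11 * C
      omega

theorem pairMax_cons (p : Int) (L : List Int) (h : 2 ≤ L.length) :
    pairMax (p :: L) = max (10 * p + fmaxL L) (pairMax L) := by
  match L, h with
  | x :: y :: u, _ => rfl

-- Case 1 of A: the maximal digit has a later digit after its first occurrence
theorem pairMax_case1 : ∀ (pre : List Int) (M s : Int) (st : List Int),
    (∀ x ∈ pre ++ M :: s :: st, 0 ≤ x ∧ x ≤ 9) → (∀ x ∈ pre ++ M :: s :: st, x ≤ M) →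
    M ∉ pre → pairMax (pre ++ M :: s :: st) = 10 * M + fmax s st := by
  intro pre
  induction pre with
  | nil =>
      intro M s st hdig hub _
      cases st with
      | nil => show pm2 M s [] = 10 * M + fmax s []; simp [pm2, fmax]
      | cons c t =>
          show max (10 * M + fmax s (c :: t)) (pm2 s c t) = 10 * M + fmax s (c :: t)
          have hsub : ∀ x ∈ s :: c :: t, x ≤ fmax s (c :: t) := by
            intro x hx
            rcases List.mem_cons.mp hx with rfl | hx'
            · exact le_fmax_self _ _
            · exact le_fmax_of_mem hx' s
          have h1 : pm2 s c t ≤ 11 * fmax s (c :: t) :=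
            pm2_le_of_ub t s c _ (hsub s List.mem_cons_self)
              (hsub c (List.mem_cons_of_mem _ List.mem_cons_self))
              (fun x hx => hsub x (List.mem_cons_of_mem _ (List.mem_cons_of_mem _ hx)))
          have h2 : fmax s (c :: t) ≤ M := fmax_le_of_ub
            (hub s (by simp)) (fun x hx => hub x (by simp [hx]))
          have h3 : 0 ≤ fmax s (c :: t) :=
            le_trans (hdig s (by simp)).1 (le_fmax_self _ _)
          have h4 : M ≤ 9 := (hdig M (by simp)).2
          omega
  | cons p pre' ih =>
      intro M s st hdig hub hnp
      have hmemtail : ∀ x ∈ pre' ++ M :: s :: st, x ∈ (p :: pre') ++ M :: s :: st := by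
        intro x hx; simp at hx ⊢; tauto
      have hlen : 2 ≤ (pre' ++ M :: s :: st).length := by simp; omega
      have hM : fmaxL (pre' ++ M :: s :: st) = M := by
        cases hL : pre' ++ M :: s :: st with
        | nil => exact absurd hL (by simp)
        | cons x u =>
            show fmax x u = M
            refine fmax_eq_of_mem_ub ?_ ?_
            · rw [← hL]; simp
            · rw [← hL]; exact fun x hx => hub x (hmemtail x hx)
      have ihv : pairMax (pre' ++ M :: s :: st) = 10 * M + fmax s st :=
        ih M s st (fun x hx => hdig x (hmemtail x hx)) (fun x hx => hub x (hmemtail x hx))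
          (fun h => hnp (List.mem_cons_of_mem _ h))
      rw [List.cons_append, pairMax_cons p _ hlen, hM, ihv]
      have hp9 : p ≤ 9 := (hdig p (by simp)).2
      have hpM : p ≤ M := hub p (by simp)
      have hpne : p ≠ M := fun h => hnp (by simp [h])
      have hs0 : 0 ≤ fmax s st := le_trans (hdig s (by simp)).1 (le_fmax_self _ _)
      have hM9 : M ≤ 9 := (hdig M (by simp)).2
      omega

-- Case 2 of A: the maximal digit occurs only as the last digit
theorem pairMax_case2 : ∀ (pre : List Int) (M : Int), pre ≠ [] → (∀ x ∈ pre, x ≤ M) →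
    pairMax (pre ++ [M]) = 10 * fmaxL pre + M := by
  intro pre
  induction pre with
  | nil => intro M h; exact absurd rfl h
  | cons p pre' ih =>
      intro M _ hub
      cases pre' with
      | nil => show pm2 p M [] = 10 * fmax p [] + M; simp [pm2, fmax]
      | cons q u =>
          have hub' : ∀ x ∈ q :: u, x ≤ M := fun x hx => hub x (List.mem_cons_of_mem _ hx)
          have hlen : 2 ≤ ((q :: u) ++ [M]).length := by simp
          rw [List.cons_append, pairMax_cons p _ hlen, ih M (by simp) hub',
            fmaxL_append_singleton_ub hub']
          show max (10 * p + M) (10 * fmax q u + M) = 10 * fmax p (q :: u) + M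
          rw [fmax_cons]
          omega

-- digits of str(n): shape and length
theorem toDigitsCore_shape : ∀ (fuel n : Nat) (acc : List Char),
    (∀ c ∈ acc, ∃ m, m < 10 ∧ c = Nat.digitChar m) →
    ∀ c ∈ Nat.toDigitsCore 10 fuel n acc, ∃ m, m < 10 ∧ c = Nat.digitChar m := by
  intro fuel
  induction fuel with
  | zero => intro n acc hacc; simpa [Nat.toDigitsCore] using hacc
  | succ f ih =>
      intro n acc hacc
      rw [Nat.toDigitsCore]
      have hd : ∀ c ∈ Nat.digitChar (n % 10) :: acc, ∃ m, m < 10 ∧ c = Nat.digitChar m := by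
        intro c hc
        rcases List.mem_cons.mp hc with rfl | hc'
        · exact ⟨n % 10, Nat.mod_lt _ (by omega), rfl⟩
        · exact hacc c hc'
      split
      · exact hd
      · exact ih (n / 10) _ hd

theorem toDigitsCore_len : ∀ (fuel n : Nat) (acc : List Char), 1 ≤ fuel →
    acc.length + 1 ≤ (Nat.toDigitsCore 10 fuel n acc).length := by
  intro fuel
  induction fuel with
  | zero => intro n acc h; omega
  | succ f ih =>
      intro n acc _
      rw [Nat.toDigitsCore]
      split
      · simp
      · rcases Nat.eq_zero_or_pos f with rfl | hf
        · simp [Nat.toDigitsCore]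
        · have := ih (n / 10) (Nat.digitChar (n % 10) :: acc) hf
          simp at this
          omega

theorem digitChar_int_bounds (m : Nat) (h : m < 10) :
    0 ≤ pyDigitInt (Nat.digitChar m) ∧ pyDigitInt (Nat.digitChar m) ≤ 9 := by
  interval_cases m <;> decide

theorem pyDigits_facts (b : Int) (hb : 10 ≤ b) :
    2 ≤ (pyDigits b).length ∧ ∀ x ∈ pyDigits b, 0 ≤ x ∧ x ≤ 9 := by
  have hnn : ¬ b < 0 := by omega
  have hchars : PySem.Int.toChars b = Nat.toDigits 10 b.toNat := by
    simp [PySem.Int.toChars, hnn]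
  have hn : 10 ≤ b.toNat := by omega
  constructor
  · have : 2 ≤ (Nat.toDigits 10 b.toNat).length := by
      show 2 ≤ (Nat.toDigitsCore 10 (b.toNat + 1) b.toNat []).length
      rw [Nat.toDigitsCore]
      have hne : ¬ b.toNat / 10 = 0 := by
        have : 1 ≤ b.toNat / 10 := (Nat.one_le_div_iff (by omega)).mpr hn
        omega
      rw [if_neg hne]
      have := toDigitsCore_len b.toNat (b.toNat / 10) [Nat.digitChar (b.toNat % 10)] (by omega)
      simpa using this
    simpa [pyDigits, hchars] using this
  · intro x hx
    simp only [pyDigits, hchars, List.mem_map] at hx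
    obtain ⟨c, hc, rfl⟩ := hx
    have := toDigitsCore_shape (b.toNat + 1) b.toNat [] (by simp) c hc
    obtain ⟨m, hm, rfl⟩ := this
    exact digitChar_int_bounds m hm

-- per-battery value of B
theorem bodyB_eq (b : Int) (hb : 10 ≤ b) : part1AltBody b = pairMax (pyDigits b) := by
  obtain ⟨hlen, _⟩ := pyDigits_facts b hb
  cases hds : pyDigits b with
  | nil => rw [hds] at hlen; simp at hlen
  | cons d0 rest =>
      cases rest with
      | nil => rw [hds] at hlen; simp at hlen
      | cons d1 t =>
          show (PySem.List.max? _ (fun y => y)).getD 0 = _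
          rw [hds, PySem.List.slice_from_one, PySem.List.pyGet?_zero_cons]
          show (PySem.List.max? ((d1 :: t).foldl _ ([], d0)).1 (fun y => y)).getD 0 = _
          rw [foldl_cands]
          show (PySem.List.max? (cands d0 (d1 :: t)) (fun y => y)).getD 0 = _
          show (PySem.List.max?
            ((10 * d0 + d1) :: cands (if d0 < d1 then d1 else d0) t) (fun y => y)).getD 0 = _
          rw [PySem.List.max?_id_cons]
          show fmax (10 * d0 + d1) (cands (if d0 < d1 then d1 else d0) t) = _
          rw [cands_fmax_eq_pm2]
          rfl

-- per-battery value of A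
theorem bodyA_eq (b : Int) (hb : 10 ≤ b) : part1Body b = pairMax (pyDigits b) := by
  obtain ⟨hlen, hdig⟩ := pyDigits_facts b hb
  simp only [part1Body]
  generalize pyDigits b = ds at hlen hdig ⊢
  have hdsne : ds ≠ [] := by intro h; rw [h] at hlen; simp at hlen
  rw [max?_getD_eq_fmaxL ds hdsne]
  obtain ⟨M, hM⟩ : ∃ M, fmaxL ds = M := ⟨_, rfl⟩
  rw [hM]
  have hMmem : M ∈ ds := by
    cases ds with
    | nil => exact absurd rfl hdsne
    | cons x u =>
        rw [← hM]
        show fmax x u ∈ x :: u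
        rcases fmax_mem_or x u with h | h
        · rw [h]; exact List.mem_cons_self
        · exact List.mem_cons_of_mem _ h
  have hMub : ∀ x ∈ ds, x ≤ M := by
    cases ds with
    | nil => exact absurd rfl hdsne
    | cons x u =>
        intro y hy
        rw [← hM]
        rcases List.mem_cons.mp hy with rfl | hy'
        · exact le_fmax_self _ _
        · exact le_fmax_of_mem hy' x
  have hidx : (PySem.List.index? ds M).isSome = true :=
    (PySem.List.index?_isSome_iff ds M).mpr hMmem
  obtain ⟨i0, hi0⟩ := Option.isSome_iff_exists.mp hidx
  obtain ⟨pre, suf, hsplit, hplen, hMpre⟩ := (PySem.List.index?_eq_some_iff ds M i0).mp hi0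
  rw [hi0, Option.getD_some]
  subst hsplit
  subst hplen
  simp only [PySem.List.len_eq]
  cases suf with
  | cons s st =>
      -- first branch: the max digit is not last
      rw [if_pos (by simp; omega)]
      have hcast : ((pre.length : Int) + 1) = ((pre.length + 1 : Nat) : Int) := by push_cast; ring
      rw [hcast, PySem.List.slice_natCast]
      have hsp : pre ++ M :: s :: st = (pre ++ [M]) ++ (s :: st) := by simp
      have hdrop : List.drop (pre.length + 1) (pre ++ M :: s :: st) = s :: st := by
        rw [hsp]
        have hl : (pre ++ [M]).length = pre.length + 1 := by simp
        rw [← hl, List.drop_left]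
      rw [hdrop]
      have htk : (pre ++ M :: s :: st).length - (pre.length + 1) = (s :: st).length := by
        simp; omega
      rw [htk, List.take_length, max?_getD_eq_fmaxL _ (by simp)]
      show 10 * M + fmax s st = pairMax (pre ++ M :: s :: st)
      rw [pairMax_case1 pre M s st hdig hMub hMpre]
  | nil =>
      -- second branch: the max digit is the last digit only
      rw [if_neg (by simp)]
      rw [PySem.List.slice_zero_start, PySem.List.slice_to_neg_one, List.dropLast_concat]
      have hprene : pre ≠ [] := by
        intro h; rw [h] at hlen; simp at hlen
      rw [max?_getD_eq_fmaxL pre hprene]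
      obtain ⟨M2, hM2⟩ : ∃ M2, fmaxL pre = M2 := ⟨_, rfl⟩
      rw [hM2]
      have hM2mem : M2 ∈ pre := by
        cases pre with
        | nil => exact absurd rfl hprene
        | cons x u =>
            rw [← hM2]
            show fmax x u ∈ x :: u
            rcases fmax_mem_or x u with h | h
            · rw [h]; exact List.mem_cons_self
            · exact List.mem_cons_of_mem _ h
      rw [PySem.List.index?_append_of_mem [M] hM2mem]
      have hidx2 : (PySem.List.index? pre M2).isSome = true :=
        (PySem.List.index?_isSome_iff pre M2).mpr hM2mem
      obtain ⟨i2, hi2⟩ := Option.isSome_iff_exists.mp hidx2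
      obtain ⟨pre2, suf2, hsplit2, hplen2, hM2pre2⟩ :=
        (PySem.List.index?_eq_some_iff pre M2 i2).mp hi2
      rw [hi2, Option.getD_some]
      subst hsplit2
      subst hplen2
      have hcast : ((pre2.length : Int) + 1) = ((pre2.length + 1 : Nat) : Int) := by
        push_cast; ring
      rw [hcast, PySem.List.slice_natCast]
      have hsp : (pre2 ++ M2 :: suf2) ++ [M] = (pre2 ++ [M2]) ++ (suf2 ++ [M]) := by simp
      have hdrop : List.drop (pre2.length + 1) ((pre2 ++ M2 :: suf2) ++ [M]) = suf2 ++ [M] := by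
        rw [hsp]
        have hl : (pre2 ++ [M2]).length = pre2.length + 1 := by simp
        rw [← hl, List.drop_left]
      rw [hdrop]
      have htk : ((pre2 ++ M2 :: suf2) ++ [M]).length - (pre2.length + 1) = (suf2 ++ [M]).length := by
        simp; omega
      rw [htk, List.take_length, max?_getD_eq_fmaxL _ (by simp)]
      have hsufub : ∀ x ∈ suf2, x ≤ M := by
        intro x hx
        exact hMub x (by simp [hx])
      rw [fmaxL_append_singleton_ub hsufub]
      have hpreub : ∀ x ∈ pre2 ++ M2 :: suf2, x ≤ M := by
        intro x hx
        exact hMub x (by simp at hx ⊢; tauto)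
      rw [pairMax_case2 _ M hprene hpreub, hM2]

-- ===== VERDICT (by name: the statement is the Claim_ definition above) =====
theorem part1_spec : Claim_equal_part1 := by
  intro data _ hPre
  show part1 data = part1_alt data
  simp only [part1, part1_alt]
  exact PySem.List.foldl_congr_mem data _ _ 0
    (fun acc x hx => by rw [bodyA_eq x (hPre x hx), bodyB_eq x (hPre x hx)])
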